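-- pv_equiv track=rewrite | github.com/Bill-Cleanturn/btc-backtest-dashboard | sim/run_backtests.py | filter_alternating
-- ===== SOURCE A (Python) =====
-- def filter_alternating(signals):
--     out = []
--     prev_dir = None
--     for s in signals:
--         if prev_dir is None or s["direction"] != prev_dir:
--             out.append(s)
--             prev_dir = s["direction"]
--     return out
-- ===== SOURCE B (Python) =====
-- def filter_alternating(signals):
--     if not signals:
--         return []
--     changes = [b for a, b in zip(signals, signals[1:]) if b["direction"] != a["direction"]]
--     return [signals[0]] + changes
-- ===== Notes on version B (the rewrite author's own statement) =====
-- stated objective: idiomatic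
-- what changed: B is stateless: it zips the list with its own tail and keeps the head plus every signal whose direction differs from its immediate predecessor, instead of A's single pass carrying a prev_dir accumulator of the last kept element; equal because within a run the predecessor's direction equals the last kept direction.
import Mathlib
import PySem

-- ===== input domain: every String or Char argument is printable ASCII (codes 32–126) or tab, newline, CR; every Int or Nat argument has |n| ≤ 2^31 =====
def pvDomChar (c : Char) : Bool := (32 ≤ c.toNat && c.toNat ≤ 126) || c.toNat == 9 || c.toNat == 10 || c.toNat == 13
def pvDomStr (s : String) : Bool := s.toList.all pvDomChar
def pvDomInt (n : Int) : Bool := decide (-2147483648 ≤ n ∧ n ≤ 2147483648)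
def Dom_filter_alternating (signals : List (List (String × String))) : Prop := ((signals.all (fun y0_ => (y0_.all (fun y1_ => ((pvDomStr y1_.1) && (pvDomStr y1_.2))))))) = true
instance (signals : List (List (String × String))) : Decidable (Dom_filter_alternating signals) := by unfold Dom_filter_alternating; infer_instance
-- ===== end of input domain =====

-- B is a stateless adjacent-pair formulation (head + signals whose direction differs from the previous signal) instead of A's prev_dir accumulator; same exact behaviour on Pre_.

-- ===== PORT A =====
-- A's loop: carry prev_dir (Option String), emit s when prev_dir is None or direction differs.
def faDir (s : List (String × String)) : String :=
  (PySem.Dict.get? (PySem.Dict.mk s) "direction").getD ""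

def faGo (prevDir : Option String) : List (List (String × String)) → List (List (String × String))
  | [] => []
  | s :: rest =>
    if prevDir = none ∨ some (faDir s) ≠ prevDir then s :: faGo (some (faDir s)) rest
    else faGo prevDir rest

def filter_alternating (signals : List (List (String × String))) : List (List (String × String)) :=
  faGo none signals

-- ===== PORT B =====
-- B: if empty return []; else zip the list with signals[1:], keep each successor whose
-- direction differs from its immediate predecessor (s["direction"] lookup = faDir, shared
-- with port A), and prepend signals[0].

def filter_alternating_alt (signals : List (List (String × String))) : List (List (String × String)) :=
  match signals with
  | [] => []
  | s0 :: _ =>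
    let changes :=
      ((signals.zip (PySem.List.slice signals (some 1) none)).filter
        (fun p => faDir p.2 != faDir p.1)).map Prod.snd
    [s0] ++ changes

-- ===== PRECONDITION & SPEC =====
-- Pre_ excludes exactly the inputs where some signal lacks the "direction" key: there Python A raises KeyError.
def Pre_filter_alternating (signals : List (List (String × String))) : Prop :=
  ∀ s ∈ signals, (PySem.Dict.get? (PySem.Dict.mk s) "direction").isSome = true
instance (signals : List (List (String × String))) : Decidable (Pre_filter_alternating signals) := by
  unfold Pre_filter_alternating; infer_instance

def pvWitness_filter_alternating : (List (List (String × String))) :=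
  [[("direction", "long")], [("direction", "short")], [("direction", "short")]]

def Spec_filter_alternating (signals : List (List (String × String))) (out : List (List (String × String))) : Prop := out = filter_alternating_alt signals
instance (signals : List (List (String × String))) (out : List (List (String × String))) : Decidable (Spec_filter_alternating signals out) := by unfold Spec_filter_alternating; infer_instance

-- ===== CLAIM (what is proved, stated in full; the proofs are below) =====
def Claim_equal_filter_alternating : Prop := ∀ (signals : List (List (String × String))), Dom_filter_alternating signals → Pre_filter_alternating signals → Spec_filter_alternating signals (filter_alternating signals)

-- ===== LEMMAS AND PROOFS =====
-- Invariant: after seeing element a, A's prev_dir equals faDir a (the immediate predecessor's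
-- direction), so A's remaining output is exactly the adjacent-pair filter of a :: xs.
lemma faGo_some_eq_pairs (xs : List (List (String × String))) (a : List (String × String)) :
    faGo (some (faDir a)) xs
      = (((a :: xs).zip xs).filter (fun p => faDir p.2 != faDir p.1)).map Prod.snd := by
  induction xs generalizing a with
  | nil => rfl
  | cons b bs ih =>
    rw [faGo, List.zip_cons_cons, List.filter]
    by_cases h : faDir b = faDir a
    · rw [if_neg (by simp [h])]
      have hb : (faDir (a, b).2 != faDir (a, b).1) = false := by
        simp [h]
      rw [hb, ← h, ih]
    · rw [if_pos (by simp [h])]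
      have hb : (faDir (a, b).2 != faDir (a, b).1) = true := by
        simp [h]
      rw [hb, List.map_cons, ih]

-- ===== VERDICT (by name: the statement is the Claim_ definition above) =====
theorem filter_alternating_spec : Claim_equal_filter_alternating := by
  intro signals _ _
  unfold Spec_filter_alternating filter_alternating filter_alternating_alt
  cases signals with
  | nil => rfl
  | cons s0 rest =>
    rw [faGo, if_pos (Or.inl rfl)]
    simp only [PySem.List.slice_from_one, List.tail_cons]
    exact congrArg _ (faGo_some_eq_pairs rest s0)
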